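-- pv_equiv track=rewrite | github.com/FranRovi/Algorithms | Leet_Code/Medium/maximumCaloriesBurntFromJumps.py | maxCaloriesBurnt
-- ===== SOURCE A (Python) =====
-- def maxCaloriesBurnt(heights):
--     sorted_heights = sorted(heights)
--     len_heights = len(heights)
--     left_ptr = 0
--     right_ptr = len_heights - 1
--     idx = 0
--     prev = 0
--     total_count = 0
--     while idx < len_heights:
--         if idx % 2 == 0:
--             total_count += abs(prev - sorted_heights[right_ptr]) ** 2
--             prev = sorted_heights[right_ptr]
--             right_ptr -= 1
--         else:
--             total_count += abs(prev - sorted_heights[left_ptr]) ** 2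
--             prev = sorted_heights[left_ptr]
--             left_ptr += 1
--         idx += 1
--     return total_count
-- ===== SOURCE B (Python) =====
-- def maxCaloriesBurnt(heights):
--     # Closed-form contribution counting: expand each squared difference of the
--     # max/min zigzag walk algebraically.  Every height's square contributes twice
--     # except the middle (last-visited) element's, and the cross terms are exactly
--     # the products of index pairs summing to n-1 or n-2 in the sorted array.
--     s = sorted(heights)
--     if not s:
--         return 0
--     n = len(s)
--
--     def folded(t):
--         # sum of t[i] * t[-1 - i] over the first half of t
--         return sum(a * b for a, b in list(zip(t, reversed(t)))[:len(t) // 2])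
--
--     sq = sum(x * x for x in s)
--     mid = s[(n - 1) // 2]
--     return 2 * sq - mid * mid - 2 * (folded(s) + folded(s[:-1]))
-- ===== Notes on version B (the rewrite author's own statement) =====
-- stated objective: alternative
-- what changed: Instead of walking the zigzag sequence at all, B expands each squared difference algebraically: the answer is 2*sum(x^2) minus the square of the middle (last-visited) sorted element minus twice the cross terms, which are exactly the products of sorted index pairs summing to n-1 or n-2, computed by zipping the sorted list with its reverse; no zigzag order and no running previous value exist in B.
import Mathlib
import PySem

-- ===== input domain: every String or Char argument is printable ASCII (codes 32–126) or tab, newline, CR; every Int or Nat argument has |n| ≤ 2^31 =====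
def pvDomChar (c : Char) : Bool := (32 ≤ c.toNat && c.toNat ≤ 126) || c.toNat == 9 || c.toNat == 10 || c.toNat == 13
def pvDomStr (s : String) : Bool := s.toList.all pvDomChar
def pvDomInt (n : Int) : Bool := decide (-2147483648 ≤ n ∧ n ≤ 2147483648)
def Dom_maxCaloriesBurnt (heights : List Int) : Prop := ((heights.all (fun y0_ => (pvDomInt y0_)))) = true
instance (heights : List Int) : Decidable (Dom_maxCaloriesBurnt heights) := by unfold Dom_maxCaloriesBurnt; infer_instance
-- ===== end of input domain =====

-- B replaces A's stateful zigzag walk by an algebraic contribution formula over the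
-- sorted array (no zigzag order, no running previous value); objective: alternative.

-- ===== PORT A =====
-- A's while loop; fuel = len - idx (the loop runs exactly len iterations).
-- Indices are always in range while the loop runs, so the `.getD 0` default is unreachable.
def maxCaloriesBurnt_loop (s : List Int) (len : Int) : Nat → Int → Int → Int → Int → Int → Int
  | 0, _, _, _, _, total => total
  | f+1, left, right, idx, prev, total =>
    if idx < len then
      if idx % 2 == 0 then
        let x := (PySem.List.pyGet? s right).getD 0
        maxCaloriesBurnt_loop s len f left (right - 1) (idx + 1) x (total + |prev - x| ^ 2)
      else
        let x := (PySem.List.pyGet? s left).getD 0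
        maxCaloriesBurnt_loop s len f (left + 1) right (idx + 1) x (total + |prev - x| ^ 2)
    else total

def maxCaloriesBurnt (heights : List Int) : Int :=
  let s := PySem.List.sorted heights (fun x => x)
  maxCaloriesBurnt_loop s (s.length : Int) s.length 0 ((s.length : Int) - 1) 0 0 0

-- ===== PORT B =====
-- folded(t) = sum of t[i] * t[-1-i] over the first half of t
def pyFolded (t : List Int) : Int :=
  (((t.zip t.reverse).take (t.length / 2)).map (fun p => p.1 * p.2)).sum

def maxCaloriesBurnt_alt (heights : List Int) : Int :=
  let s := PySem.List.sorted heights (fun x => x)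
  if s = [] then 0
  else
    let n := s.length
    let sq := (s.map (fun x => x * x)).sum
    let mid := (PySem.List.pyGet? s (PySem.Int.floordiv ((n : Int) - 1) 2)).getD 0
    2 * sq - mid * mid - 2 * (pyFolded s + pyFolded (PySem.List.slice s none (some (-1))))

-- ===== PRECONDITION & SPEC =====
def Spec_maxCaloriesBurnt (heights : List Int) (out : Int) : Prop := out = maxCaloriesBurnt_alt heights
instance (heights : List Int) (out : Int) : Decidable (Spec_maxCaloriesBurnt heights out) := by unfold Spec_maxCaloriesBurnt; infer_instance

-- ===== CLAIM (what is proved, stated in full; the proofs are below) =====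
def Claim_equal_maxCaloriesBurnt : Prop := ∀ (heights : List Int), Dom_maxCaloriesBurnt heights → Spec_maxCaloriesBurnt heights (maxCaloriesBurnt heights)

-- ===== LEMMAS AND PROOFS =====

-- chained squared differences, a proof-only characterisation of A's loop
def pairSum : Int → List Int → Int
  | _, [] => 0
  | prev, x :: xs => (prev - x) ^ 2 + pairSum x xs

-- proof-only: the zigzag order (largest, smallest, second largest, ...) of a list
def ordB (s : List Int) : List Int :=
  ((s.reverse.zip s).flatMap (fun p => [p.1, p.2])).take s.length

-- proof-only: B's closed form, generalised over the initial previous value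
def sumsq (s : List Int) : Int := (s.map (fun x => x * x)).sum

def Bform (prev : Int) (s : List Int) : Int :=
  if s = [] then 0
  else
    2 * sumsq s - (s.getD ((s.length - 1) / 2) 0) * (s.getD ((s.length - 1) / 2) 0)
      + prev * prev - 2 * prev * (s.getLastD 0)
      - 2 * (pyFolded s + pyFolded s.dropLast)

lemma length_flatMap_pair (l : List (Int × Int)) :
    (l.flatMap (fun p => [p.1, p.2])).length = 2 * l.length := by
  induction l with
  | nil => simp
  | cons h t ih => simp [ih]; omega

lemma ordB_cons_concat (a y : Int) (m : List Int) :
    ordB (a :: (m ++ [y])) = y :: a :: ordB m := by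
  unfold ordB
  rw [show (a :: (m ++ [y])).reverse = y :: (m.reverse ++ [a]) from by simp,
    List.zip_cons_cons, List.zip_append (by simp)]
  simp only [List.flatMap_cons, List.flatMap_append, List.length_cons,
    List.length_append, List.length_nil, List.cons_append, List.nil_append]
  rw [List.take_succ_cons, List.take_succ_cons,
    List.take_append_of_le_length (by rw [length_flatMap_pair]; simp; omega)]

lemma loop_eq : ∀ (n : Nat) (seg p q : List Int) (prev total : Int),
    seg.length = n → p.length = q.length →
    maxCaloriesBurnt_loop (p ++ seg ++ q) ((p ++ seg ++ q).length : Int) seg.length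
      (p.length : Int) ((p.length : Int) + (seg.length : Int) - 1) (2 * (p.length : Int)) prev total
    = total + pairSum prev (ordB seg) := by
  intro n
  induction n using Nat.strong_induction_on with
  | _ n ih =>
    intro seg p q prev total hn hpq
    rcases seg with _ | ⟨a, _ | ⟨b, t⟩⟩
    · simp [maxCaloriesBurnt_loop, pairSum, ordB]
    · -- seg = [a]
      have hguard : (2 * (p.length : Int)) < ((p ++ [a] ++ q).length : Int) := by
        simp; omega
      have hget : PySem.List.pyGet? (p ++ [a] ++ q) (p.length : Int) = some a := by
        rw [show p ++ [a] ++ q = p ++ a :: q from by simp]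
        exact PySem.List.pyGet?_append_length p q a
      simp only [List.length_cons, List.length_nil, maxCaloriesBurnt_loop, hget,
        if_pos hguard]
      simp [pairSum, ordB, sq_abs]
    · -- seg = a :: b :: t, length ≥ 2
      set m := (b :: t).dropLast with hm
      set y := (b :: t).getLast (by simp) with hy
      have hbt : m ++ [y] = b :: t := List.dropLast_append_getLast (by simp)
      have hmt : m.length = t.length := by
        have := congrArg List.length hbt
        simp at this; omega
      rw [show (a :: b :: t : List Int) = a :: (m ++ [y]) from by rw [hbt]]
      have hslen : (a :: (m ++ [y])).length = m.length + 2 := by simp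
      have hget1 : PySem.List.pyGet? (p ++ (a :: (m ++ [y])) ++ q)
          ((p.length : Int) + (((m.length + 2 : Nat)) : Int) - 1) = some y := by
        rw [show p ++ (a :: (m ++ [y])) ++ q = (p ++ a :: m) ++ y :: q from by simp,
          show ((p.length : Int) + (((m.length + 2 : Nat)) : Int) - 1)
            = (((p ++ a :: m).length : Nat) : Int) from by push_cast [List.length_append, List.length_cons]; omega]
        exact PySem.List.pyGet?_append_length (p ++ a :: m) q y
      have hget2 : PySem.List.pyGet? (p ++ (a :: (m ++ [y])) ++ q) (p.length : Int) = some a := by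
        rw [show p ++ (a :: (m ++ [y])) ++ q = p ++ a :: (m ++ [y] ++ q) from by simp]
        exact PySem.List.pyGet?_append_length p (m ++ [y] ++ q) a
      -- unfold two iterations of A's loop
      rw [hslen, maxCaloriesBurnt_loop, if_pos (by push_cast [List.length_append, List.length_cons]; omega),
        if_pos (by simp [Int.mul_emod_right])]
      simp only [hget1, Option.getD_some]
      rw [maxCaloriesBurnt_loop, if_pos (by push_cast [List.length_append, List.length_cons]; omega),
        if_neg (by simp)]
      simp only [hget2, Option.getD_some]
      -- re-shape the state into the induction hypothesis for p ++ [a], m, y :: q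
      have hih := ih m.length (by have h := hn; simp at h; omega) m (p ++ [a]) (y :: q) a
        (total + |prev - y| ^ 2 + |y - a| ^ 2) rfl (by simp; omega)
      rw [show (p ++ [a]) ++ m ++ (y :: q) = p ++ (a :: (m ++ [y])) ++ q from by simp] at hih
      have e1 : (((p ++ [a]).length : Int)) = (p.length : Int) + 1 := by simp
      rw [e1] at hih
      rw [show ((p.length : Int) + (((m.length + 2 : Nat)) : Int) - 1 - 1)
            = ((p.length : Int) + 1) + (m.length : Int) - 1 from by push_cast; ring,
          show (2 * (p.length : Int) + 1 + 1) = 2 * ((p.length : Int) + 1) from by ring]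
      rw [hih, ordB_cons_concat]
      simp [pairSum, sq_abs]
      ring

-- pyFolded peels the outer (min, max) product
lemma pyFolded_cons_concat (a y : Int) (m : List Int) :
    pyFolded (a :: (m ++ [y])) = a * y + pyFolded m := by
  unfold pyFolded
  rw [show (a :: (m ++ [y])).reverse = y :: (m.reverse ++ [a]) from by simp,
    List.zip_cons_cons, List.zip_append (by simp)]
  have hlen : (a :: (m ++ [y])).length / 2 = m.length / 2 + 1 := by simp; omega
  rw [hlen, List.take_succ_cons,
    List.take_append_of_le_length (by rw [List.length_zip]; simp; omega)]
  simp

-- B's closed form satisfies the same two-step peel recursion as the zigzag pair sum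
lemma Bform_peel (prev a y : Int) (m : List Int) :
    Bform prev (a :: (m ++ [y])) = (prev - y) ^ 2 + (y - a) ^ 2 + Bform a m := by
  rcases m.eq_nil_or_concat' with hmnil | ⟨m', z, rfl⟩
  · subst hmnil
    simp [Bform, sumsq, pyFolded]
    ring
  · -- m = m' ++ [z] is nonempty
    have hmne : (m' ++ [z] : List Int) ≠ [] := by simp
    have hdl : (a :: (m' ++ [z] ++ [y])).dropLast = a :: (m' ++ [z]) := by
      rw [show (a :: (m' ++ [z] ++ [y])) = (a :: (m' ++ [z])) ++ [y] from by simp]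
      exact List.dropLast_concat
    have hdl2 : (a :: (m' ++ [z])).dropLast = a :: m' := by
      rw [show (a :: (m' ++ [z])) = (a :: m') ++ [z] from by simp]
      exact List.dropLast_concat
    have hmidx : (a :: (m' ++ [z] ++ [y])).getD (((a :: (m' ++ [z] ++ [y])).length - 1) / 2) 0
        = (m' ++ [z]).getD (((m' ++ [z]).length - 1) / 2) 0 := by
      have hL : ((a :: (m' ++ [z] ++ [y])).length - 1) / 2 = ((m' ++ [z]).length - 1) / 2 + 1 := by
        simp
      rw [hL]
      simp only [List.getD, List.getElem?_cons_succ]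
      rw [show (m' ++ [z] ++ [y] : List Int) = (m' ++ [z]) ++ [y] from by simp,
        List.getElem?_append_left (by simp; omega)]
    have hlast : (a :: (m' ++ [z] ++ [y])).getLastD 0 = y := by
      rw [show (a :: (m' ++ [z] ++ [y])) = (a :: (m' ++ [z])) ++ [y] from by simp]
      exact List.getLastD_concat
    have hlast2 : (m' ++ [z] : List Int).getLastD 0 = z := by simp
    have hsq : sumsq (a :: (m' ++ [z] ++ [y])) = a * a + sumsq (m' ++ [z]) + y * y := by
      simp [sumsq]; ring
    have hf1 : pyFolded (a :: (m' ++ [z] ++ [y])) = a * y + pyFolded (m' ++ [z]) := by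
      rw [show (m' ++ [z] ++ [y] : List Int) = (m' ++ [z]) ++ [y] from by simp]
      exact pyFolded_cons_concat a y (m' ++ [z])
    have hf2 : pyFolded (a :: (m' ++ [z])) = a * z + pyFolded m' := pyFolded_cons_concat a z m'
    rcases m'.eq_nil_or_concat' with rfl | ⟨m'', w, rfl⟩
    · -- inner list is [z]
      simp only [Bform, List.nil_append] at *
      rw [if_neg (by simp), if_neg (by simp), hmidx, hlast, hsq, hdl, hf1, hf2, hlast2]
      simp [sumsq, pyFolded]
      ring
    · have hdl3 : (m'' ++ [w] ++ [z] : List Int).dropLast = m'' ++ [w] := by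
        rw [show (m'' ++ [w] ++ [z] : List Int) = (m'' ++ [w]) ++ [z] from by simp]
        exact List.dropLast_concat
      simp only [Bform] at *
      rw [if_neg (by simp), if_neg (by simp), hmidx, hlast, hsq, hdl, hf1, hf2, hdl3, hlast2]
      ring

-- the zigzag pair sum equals B's closed form, for every starting previous value
lemma pairSum_ordB_eq_Bform : ∀ (n : Nat) (s : List Int) (prev : Int), s.length = n →
    pairSum prev (ordB s) = Bform prev s := by
  intro n
  induction n using Nat.strong_induction_on with
  | _ n ih =>
    intro s prev hn
    rcases s with _ | ⟨a, _ | ⟨b, t⟩⟩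
    · simp [ordB, pairSum, Bform]
    · norm_num [ordB, pairSum, Bform, sumsq, pyFolded]
      ring
    · set m := (b :: t).dropLast with hm
      set y := (b :: t).getLast (by simp) with hy
      have hbt : m ++ [y] = b :: t := List.dropLast_append_getLast (by simp)
      have hmt : m.length = t.length := by
        have := congrArg List.length hbt
        simp at this; omega
      rw [show (a :: b :: t : List Int) = a :: (m ++ [y]) from by rw [hbt],
        ordB_cons_concat]
      simp only [pairSum]
      rw [ih m.length (by have h := hn; simp at h; omega) m a rfl, Bform_peel]
      ring

-- bridge: port B's body is Bform 0
lemma alt_eq_Bform (heights : List Int) :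
    maxCaloriesBurnt_alt heights = Bform 0 (PySem.List.sorted heights (fun x => x)) := by
  unfold maxCaloriesBurnt_alt Bform
  set s := PySem.List.sorted heights (fun x => x) with hs
  simp only []
  by_cases hnil : s = []
  · simp [hnil]
  · have hlen : 1 ≤ s.length := by
      rcases s with _ | _
      · exact absurd rfl hnil
      · simp
    rw [if_neg hnil, if_neg hnil]
    have hmid : (PySem.List.pyGet? s (PySem.Int.floordiv ((s.length : Int) - 1) 2)).getD 0
        = s.getD ((s.length - 1) / 2) 0 := by
      rw [show ((s.length : Int) - 1) = (((s.length - 1 : Nat)) : Int) from by push_cast [hlen]; ring,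
        show ((2 : Int)) = (((2 : Nat)) : Int) from rfl,
        PySem.Int.floordiv_natCast, PySem.List.pyGet?_natCast]
      rfl
    rw [hmid, PySem.List.slice_to_neg_one]
    unfold sumsq
    ring

-- ===== VERDICT (by name: the statement is the Claim_ definition above) =====
theorem maxCaloriesBurnt_spec : Claim_equal_maxCaloriesBurnt := by
  intro heights _
  unfold Spec_maxCaloriesBurnt maxCaloriesBurnt
  have h := loop_eq (PySem.List.sorted heights (fun x => x)).length
    (PySem.List.sorted heights (fun x => x)) [] [] 0 0 rfl rfl
  simp only [List.nil_append, List.append_nil, List.length_nil, Nat.cast_zero, zero_add, mul_zero] at h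
  rw [alt_eq_Bform, ← pairSum_ordB_eq_Bform (PySem.List.sorted heights (fun x => x)).length _ 0 rfl]
  simpa using h
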